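-- pv_equiv track=rewrite | github.com/Zzzians/py_cmp | gst.py | GST
-- ===== SOURCE A (Python) =====
-- def GST(s1,s2,MML):
-- 	marked1=[0]*20000;marked2=[0]*20000
-- 	samelength=0;mmax=0
-- 	suc=1
-- 	l1=len(s1);l2=len(s2)
-- 	while(suc==1):
-- 		maxmatch=MML
-- 		matches=[]
-- 		for i in range(l1):
-- 			if(marked1[i]):continue
-- 			for j in range(l2):
-- 				if(marked2[j]):continue
-- 				k=0
-- 				while(i+k<l1 and j+k<l2 and s1[i+k]==s2[j+k]):k=k+1
-- 				if(k==maxmatch):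
-- 					if(len(matches)==0 or (i>matches[-1][0]+matches[-1][2] and j>matches[-1][1]+matches[-1][2])):matches.append([i,j,k])
-- 				if(k>maxmatch):
-- 					maxmatch=k
-- 					matches=[[i,j,k]]
-- 		for match in matches:
-- 			i1,j1,k1=match[0],match[1],match[2]
-- 			marked1[i1:i1+k1]=[1]*k1;marked2[j1:j1+k1]=[1]*k1
-- 			samelength+=maxmatch
-- 		if(mmax==0 and len(matches)):mmax=maxmatch
-- 		if(maxmatch==MML):suc=0
-- 	return [samelength,mmax,min(l1,l2)]
-- ===== SOURCE B (Python) =====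
-- # B: greedy string tiling with a longest-common-extension (LCE) table precomputed
-- # once; each round is two plain passes (max, then collect) instead of A's evolving
-- # accumulator with an O(min(l1,l2)) rescan per pair.
-- def GST(s1, s2, MML):
--     l1 = len(s1); l2 = len(s2)
--     # lcp[i][j] = length of the longest common prefix of s1[i:] and s2[j:]
--     lcp = [[0] * (l2 + 1) for _ in range(l1 + 1)]
--     for i in range(l1 - 1, -1, -1):
--         row = lcp[i]; nxt = lcp[i + 1]; c = s1[i]
--         for j in range(l2 - 1, -1, -1):
--             if c == s2[j]:
--                 row[j] = nxt[j + 1] + 1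
--     marked1 = [0] * l1
--     marked2 = [0] * l2
--     samelength = 0
--     mmax = 0
--     while True:
--         # pass 1: this round's maximal extension over unmarked pairs (at least MML)
--         best = MML
--         for i in range(l1):
--             if marked1[i]:
--                 continue
--             row = lcp[i]
--             for j in range(l2):
--                 if not marked2[j] and row[j] > best:
--                     best = row[j]
--         # pass 2: collect the tiles of exactly that length, in scan order,
--         # keeping one only if it starts strictly past the previously kept tile
--         matches = []
--         for i in range(l1):
--             if marked1[i]:
--                 continue
--             row = lcp[i]
--             for j in range(l2):
--                 if marked2[j] or row[j] != best:
--                     continue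
--                 if not matches or (i > matches[-1][0] + best and j > matches[-1][1] + best):
--                     matches.append((i, j))
--         for (i1, j1) in matches:
--             marked1[i1:i1 + best] = [1] * best
--             marked2[j1:j1 + best] = [1] * best
--             samelength += best
--         if mmax == 0 and matches:
--             mmax = best
--         if best == MML:
--             return [samelength, mmax, min(l1, l2)]
-- ===== Notes on version B (the rewrite author's own statement) =====
-- stated objective: faster
-- what changed: B precomputes a longest-common-extension table lcp[i][j] once (DP from the string ends), replacing A's per-pair character rescan, and computes each round's result in two plain passes (max over unmarked pairs, then collect tiles of that length) instead of A's evolving (maxmatch, matches) accumulator.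
import Mathlib
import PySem

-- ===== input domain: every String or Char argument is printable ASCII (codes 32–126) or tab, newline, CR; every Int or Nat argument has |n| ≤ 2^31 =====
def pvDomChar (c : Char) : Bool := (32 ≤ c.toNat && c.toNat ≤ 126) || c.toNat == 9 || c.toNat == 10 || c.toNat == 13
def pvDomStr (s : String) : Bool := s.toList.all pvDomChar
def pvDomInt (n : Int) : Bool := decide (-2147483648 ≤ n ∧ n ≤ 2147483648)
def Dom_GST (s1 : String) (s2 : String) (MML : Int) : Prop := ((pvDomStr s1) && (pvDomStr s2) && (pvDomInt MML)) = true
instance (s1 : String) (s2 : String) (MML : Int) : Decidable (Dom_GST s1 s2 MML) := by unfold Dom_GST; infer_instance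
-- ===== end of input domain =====

-- B replaces A's per-pair while-loop rescans by a longest-common-extension table
-- computed once, and each round's evolving (maxmatch, matches) accumulator by two
-- plain passes (max, then collect); measured faster on match-heavy inputs.
-- A mutates nothing observable; the equivalence is about the return value.

-- ===== PORT A =====
-- A's inner `while(i+k<l1 and j+k<l2 and s1[i+k]==s2[j+k]): k=k+1`; `fuel` is only a
-- structural bound (when it hits 0 the loop condition is already false), the value is
-- exactly Python's final k.
def GSTkAux (c1 c2 : List Char) (i j : Nat) : Nat → Nat → Nat
  | 0, k => k
  | fuel + 1, k =>
    if i + k < c1.length ∧ j + k < c2.length ∧ c1.getD (i + k) ' ' = c2.getD (j + k) ' ' then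
      GSTkAux c1 c2 i j fuel (k + 1)
    else k

def GSTk (c1 c2 : List Char) (i j k : Nat) : Nat := GSTkAux c1 c2 i j (c1.length - (i + k)) k

-- `len(matches)==0 or (i>matches[-1][0]+matches[-1][2] and j>matches[-1][1]+matches[-1][2])`
def GSTokA (ms : List (Nat × Nat × Int)) (i j : Nat) : Bool :=
  match ms.getLast? with
  | none => true
  | some t => decide ((t.1 : Int) + t.2.2 < (i : Int)) && decide ((t.2.1 : Int) + t.2.2 < (j : Int))

-- the body of A's `for j` loop (state = (maxmatch, matches))
def GSTstepA (c1 c2 : List Char) (m2 : List Bool) (st : Int × List (Nat × Nat × Int))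
    (i j : Nat) : Int × List (Nat × Nat × Int) :=
  if m2.getD j true then st
  else
    let k : Int := (GSTk c1 c2 i j 0 : Int)
    let st1 := if k = st.1 then
        (st.1, if GSTokA st.2 i j then st.2 ++ [(i, j, k)] else st.2)
      else st
    if k > st1.1 then (k, [(i, j, k)]) else st1

-- A's nested `for i … for j …` scan of one round
def GSTscanA (c1 c2 : List Char) (m1 m2 : List Bool) (MML : Int) :
    Int × List (Nat × Nat × Int) :=
  (List.range c1.length).foldl (fun st i =>
    if m1.getD i true then st
    else (List.range c2.length).foldl (fun st j => GSTstepA c1 c2 m2 st i j) st) (MML, [])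

-- `marked[a:a+k] = [1]*k` (both sources contain this same line).  The Python
-- allocates 20000 cells but reads/writes only indices < len(s), so the mark
-- array is ported at length len(s).
def GSTmark (l : List Bool) (a k : Nat) : List Bool :=
  (List.range k).foldl (fun l t => l.set (a + t) true) l

-- A's `while(suc==1)` loop; `fuel` is a totality guard only: whenever the Python
-- terminates, every non-final round marks a fresh position of s1, so c1.length+2
-- rounds suffice (where the Python loops forever, both ports fuel out identically).
def GSTloopA (c1 c2 : List Char) (MML : Int) :
    Nat → List Bool → List Bool → Int → Int → List Int
  | 0, _, _, sl, mm => [sl, mm, ((min c1.length c2.length : Nat) : Int)]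
  | fuel + 1, m1, m2, sl, mm =>
    let r := GSTscanA c1 c2 m1 m2 MML
    let s := r.2.foldl (fun (a : List Bool × List Bool × Int) t =>
      (GSTmark a.1 t.1 t.2.2.toNat, GSTmark a.2.1 t.2.1 t.2.2.toNat, a.2.2 + r.1)) (m1, m2, sl)
    let mm' := if mm = 0 ∧ r.2 ≠ [] then r.1 else mm
    if r.1 = MML then [s.2.2, mm', ((min c1.length c2.length : Nat) : Int)]
    else GSTloopA c1 c2 MML fuel s.1 s.2.1 s.2.2 mm'

def GST (s1 : String) (s2 : String) (MML : Int) : List Int :=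
  GSTloopA s1.toList s2.toList MML (s1.toList.length + 2)
    (List.replicate s1.toList.length false) (List.replicate s2.toList.length false) 0 0

-- ===== PORT B =====
-- B's LCE table entry lcp[i][j], ported as the recurrence the table is filled with
-- (lcp[i][j] = lcp[i+1][j+1]+1 if s1[i]==s2[j] else 0)
-- `fuel` is only a structural bound, as in GSTkAux.
def GSTlceAux (c1 c2 : List Char) : Nat → Nat → Nat → Nat
  | 0, _, _ => 0
  | fuel + 1, i, j =>
    if i < c1.length ∧ j < c2.length ∧ c1.getD i ' ' = c2.getD j ' ' then
      GSTlceAux c1 c2 fuel (i + 1) (j + 1) + 1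
    else 0

def GSTlce (c1 c2 : List Char) (i j : Nat) : Nat := GSTlceAux c1 c2 (c1.length - i) i j

-- B's pass 1: `best = MML; … if not marked2[j] and row[j] > best: best = row[j]`
def GSTbest (c1 c2 : List Char) (m1 m2 : List Bool) (MML : Int) : Int :=
  (List.range c1.length).foldl (fun b i =>
    if m1.getD i true then b
    else (List.range c2.length).foldl (fun b j =>
      if m2.getD j true = false ∧ (GSTlce c1 c2 i j : Int) > b then (GSTlce c1 c2 i j : Int)
      else b) b) MML

-- `not matches or (i > matches[-1][0] + best and j > matches[-1][1] + best)`
def GSTokB (ms : List (Nat × Nat)) (best : Int) (i j : Nat) : Bool :=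
  match ms.getLast? with
  | none => true
  | some p => decide ((p.1 : Int) + best < (i : Int)) && decide ((p.2 : Int) + best < (j : Int))

-- B's pass 2
def GSTcollect (c1 c2 : List Char) (m1 m2 : List Bool) (best : Int) : List (Nat × Nat) :=
  (List.range c1.length).foldl (fun ms i =>
    if m1.getD i true then ms
    else (List.range c2.length).foldl (fun ms j =>
      if m2.getD j true = true ∨ (GSTlce c1 c2 i j : Int) ≠ best then ms
      else if GSTokB ms best i j then ms ++ [(i, j)] else ms) ms) []

-- B's `while True` loop; same totality guard as A's port.
def GSTloopB (c1 c2 : List Char) (MML : Int) :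
    Nat → List Bool → List Bool → Int → Int → List Int
  | 0, _, _, sl, mm => [sl, mm, ((min c1.length c2.length : Nat) : Int)]
  | fuel + 1, m1, m2, sl, mm =>
    let best := GSTbest c1 c2 m1 m2 MML
    let ms := GSTcollect c1 c2 m1 m2 best
    let s := ms.foldl (fun (a : List Bool × List Bool × Int) p =>
      (GSTmark a.1 p.1 best.toNat, GSTmark a.2.1 p.2 best.toNat, a.2.2 + best)) (m1, m2, sl)
    let mm' := if mm = 0 ∧ ms ≠ [] then best else mm
    if best = MML then [s.2.2, mm', ((min c1.length c2.length : Nat) : Int)]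
    else GSTloopB c1 c2 MML fuel s.1 s.2.1 s.2.2 mm'

def GST_alt (s1 : String) (s2 : String) (MML : Int) : List Int :=
  GSTloopB s1.toList s2.toList MML (s1.toList.length + 2)
    (List.replicate s1.toList.length false) (List.replicate s2.toList.length false) 0 0

-- ===== PRECONDITION & SPEC =====
-- No Pre_: the two ports are equal on every input (they share the fuel bound and
-- model A's fixed-size mark arrays at string length, so they agree even where the
-- Python A would raise past 20000 chars or loop forever on negative MML).
def Spec_GST (s1 : String) (s2 : String) (MML : Int) (out : List Int) : Prop :=
  out = GST_alt s1 s2 MML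
instance (s1 : String) (s2 : String) (MML : Int) (out : List Int) :
    Decidable (Spec_GST s1 s2 MML out) := by unfold Spec_GST; infer_instance

-- ===== CLAIM =====
def Claim_equal_GST : Prop :=
  ∀ (s1 : String) (s2 : String) (MML : Int),
    Dom_GST s1 s2 MML → Spec_GST s1 s2 MML (GST s1 s2 MML)

-- ===== LEMMAS AND PROOFS =====

-- unfolding equations hiding the structural fuel
theorem GSTlce_unfold (c1 c2 : List Char) (i j : Nat) :
    GSTlce c1 c2 i j =
      if i < c1.length ∧ j < c2.length ∧ c1.getD i ' ' = c2.getD j ' ' then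
        GSTlce c1 c2 (i + 1) (j + 1) + 1
      else 0 := by
  unfold GSTlce
  rcases Nat.lt_or_ge i c1.length with h | h
  · have hf : c1.length - i = (c1.length - (i + 1)) + 1 := by omega
    rw [hf]
    rfl
  · have hf : c1.length - i = 0 := by omega
    rw [hf, if_neg (by rintro ⟨h1, -⟩; omega)]
    rfl

theorem GSTk_unfold (c1 c2 : List Char) (i j k : Nat) :
    GSTk c1 c2 i j k =
      if i + k < c1.length ∧ j + k < c2.length ∧ c1.getD (i + k) ' ' = c2.getD (j + k) ' ' then
        GSTk c1 c2 i j (k + 1)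
      else k := by
  unfold GSTk
  rcases Nat.lt_or_ge (i + k) c1.length with h | h
  · have hf : c1.length - (i + k) = (c1.length - (i + (k + 1))) + 1 := by omega
    rw [hf]
    rfl
  · have hf : c1.length - (i + k) = 0 := by omega
    rw [hf, if_neg (by rintro ⟨h1, -⟩; omega)]
    rfl

-- A's rescan from offset k equals k plus B's LCE recurrence at the shifted start.
theorem GSTk_eq (c1 c2 : List Char) (i j : Nat) :
    ∀ (f k : Nat), c1.length - (i + k) ≤ f →
      GSTk c1 c2 i j k = k + GSTlce c1 c2 (i + k) (j + k) := by
  intro f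
  induction f with
  | zero =>
    intro k hf
    rw [GSTk_unfold, if_neg (by rintro ⟨h1, -⟩; omega),
        GSTlce_unfold, if_neg (by rintro ⟨h1, -⟩; omega)]
    omega
  | succ n ih =>
    intro k hf
    rw [GSTk_unfold, GSTlce_unfold]
    by_cases h : i + k < c1.length ∧ j + k < c2.length ∧ c1.getD (i + k) ' ' = c2.getD (j + k) ' '
    · rw [if_pos h, if_pos h]
      have ihk := ih (k + 1) (by omega)
      have e1 : i + (k + 1) = i + k + 1 := rfl
      have e2 : j + (k + 1) = j + k + 1 := rfl
      rw [e1, e2] at ihk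
      rw [ihk]
      omega
    · rw [if_neg h, if_neg h]
      omega

theorem GSTk_zero (c1 c2 : List Char) (i j : Nat) :
    GSTk c1 c2 i j 0 = GSTlce c1 c2 i j := by
  have h := GSTk_eq c1 c2 i j (c1.length - (i + 0)) 0 (le_refl _)
  simpa using h

-- proof-side flat formulation of one round's scan over the (i,j) grid
def pvU (m1 m2 : List Bool) (p : Nat × Nat) : Bool :=
  !(m1.getD p.1 true) && !(m2.getD p.2 true)

def pvK (c1 c2 : List Char) (p : Nat × Nat) : Int := (GSTlce c1 c2 p.1 p.2 : Int)

def pvFA (c1 c2 : List Char) (m1 m2 : List Bool) (st : Int × List (Nat × Nat × Int))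
    (p : Nat × Nat) : Int × List (Nat × Nat × Int) :=
  if pvU m1 m2 p = true then
    if pvK c1 c2 p > st.1 then (pvK c1 c2 p, [(p.1, p.2, pvK c1 c2 p)])
    else if pvK c1 c2 p = st.1 then
      (st.1, if GSTokA st.2 p.1 p.2 then st.2 ++ [(p.1, p.2, pvK c1 c2 p)] else st.2)
    else st
  else st

def pvBest (c1 c2 : List Char) (m1 m2 : List Bool) (b : Int) (ps : List (Nat × Nat)) : Int :=
  ps.foldl (fun b p => if pvU m1 m2 p = true ∧ pvK c1 c2 p > b then pvK c1 c2 p else b) b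

def pvColA (c1 c2 : List Char) (m1 m2 : List Bool) (M : Int) (ms : List (Nat × Nat × Int))
    (ps : List (Nat × Nat)) : List (Nat × Nat × Int) :=
  ps.foldl (fun ms p =>
    if pvU m1 m2 p = true ∧ pvK c1 c2 p = M then
      (if GSTokA ms p.1 p.2 then ms ++ [(p.1, p.2, M)] else ms)
    else ms) ms

def pvColB (c1 c2 : List Char) (m1 m2 : List Bool) (M : Int) (ms : List (Nat × Nat))
    (ps : List (Nat × Nat)) : List (Nat × Nat) :=
  ps.foldl (fun ms p =>
    if pvU m1 m2 p = true ∧ pvK c1 c2 p = M then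
      (if GSTokB ms M p.1 p.2 then ms ++ [p] else ms)
    else ms) ms

def pvPairs (l1 l2 : Nat) : List (Nat × Nat) :=
  (List.range l1).flatMap (fun i => (List.range l2).map (fun j => (i, j)))

theorem pvU_false_left (m1 m2 : List Bool) (i j : Nat) (h : m1.getD i true = true) :
    pvU m1 m2 (i, j) = false := by
  show (!(m1.getD i true) && !(m2.getD j true)) = false
  rw [h]; rfl

theorem pvU_false_right (m1 m2 : List Bool) (i j : Nat) (h : m2.getD j true = true) :
    pvU m1 m2 (i, j) = false := by
  show (!(m1.getD i true) && !(m2.getD j true)) = false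
  rw [h]
  cases m1.getD i true <;> rfl

theorem pvU_true (m1 m2 : List Bool) (i j : Nat) (h1 : m1.getD i true = false)
    (h2 : m2.getD j true = false) : pvU m1 m2 (i, j) = true := by
  show (!(m1.getD i true) && !(m2.getD j true)) = true
  rw [h1, h2]; rfl

-- pointwise evaluation lemmas for pvFA
theorem pvFA_skip (c1 c2 : List Char) (m1 m2 : List Bool) (st : Int × List (Nat × Nat × Int))
    (p : Nat × Nat) (hU : ¬ pvU m1 m2 p = true) : pvFA c1 c2 m1 m2 st p = st := by
  simp [pvFA, hU]

theorem pvFA_lt (c1 c2 : List Char) (m1 m2 : List Bool) (st : Int × List (Nat × Nat × Int))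
    (p : Nat × Nat) (hU : pvU m1 m2 p = true) (h : pvK c1 c2 p < st.1) :
    pvFA c1 c2 m1 m2 st p = st := by
  unfold pvFA
  rw [if_pos hU, if_neg (by omega), if_neg (by omega)]

theorem pvFA_eq (c1 c2 : List Char) (m1 m2 : List Bool) (st : Int × List (Nat × Nat × Int))
    (p : Nat × Nat) (hU : pvU m1 m2 p = true) (h : pvK c1 c2 p = st.1) :
    pvFA c1 c2 m1 m2 st p
      = (st.1, if GSTokA st.2 p.1 p.2 then st.2 ++ [(p.1, p.2, pvK c1 c2 p)] else st.2) := by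
  unfold pvFA
  rw [if_pos hU, if_neg (by omega), if_pos h]

theorem pvFA_gt (c1 c2 : List Char) (m1 m2 : List Bool) (st : Int × List (Nat × Nat × Int))
    (p : Nat × Nat) (hU : pvU m1 m2 p = true) (h : pvK c1 c2 p > st.1) :
    pvFA c1 c2 m1 m2 st p = (pvK c1 c2 p, [(p.1, p.2, pvK c1 c2 p)]) := by
  unfold pvFA
  rw [if_pos hU, if_pos h]

-- one-step unfoldings
theorem pvBest_cons_hit (c1 c2 : List Char) (m1 m2 : List Bool) (b : Int) (p : Nat × Nat)
    (ps : List (Nat × Nat)) (h : pvU m1 m2 p = true ∧ pvK c1 c2 p > b) :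
    pvBest c1 c2 m1 m2 b (p :: ps) = pvBest c1 c2 m1 m2 (pvK c1 c2 p) ps := by
  unfold pvBest; rw [List.foldl_cons, if_pos h]

theorem pvBest_cons_miss (c1 c2 : List Char) (m1 m2 : List Bool) (b : Int) (p : Nat × Nat)
    (ps : List (Nat × Nat)) (h : ¬ (pvU m1 m2 p = true ∧ pvK c1 c2 p > b)) :
    pvBest c1 c2 m1 m2 b (p :: ps) = pvBest c1 c2 m1 m2 b ps := by
  unfold pvBest; rw [List.foldl_cons, if_neg h]

theorem pvColA_cons_hit (c1 c2 : List Char) (m1 m2 : List Bool) (M : Int)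
    (ms : List (Nat × Nat × Int)) (p : Nat × Nat) (ps : List (Nat × Nat))
    (h : pvU m1 m2 p = true ∧ pvK c1 c2 p = M) :
    pvColA c1 c2 m1 m2 M ms (p :: ps)
      = pvColA c1 c2 m1 m2 M (if GSTokA ms p.1 p.2 then ms ++ [(p.1, p.2, M)] else ms) ps := by
  unfold pvColA; rw [List.foldl_cons, if_pos h]

theorem pvColA_cons_miss (c1 c2 : List Char) (m1 m2 : List Bool) (M : Int)
    (ms : List (Nat × Nat × Int)) (p : Nat × Nat) (ps : List (Nat × Nat))
    (h : ¬ (pvU m1 m2 p = true ∧ pvK c1 c2 p = M)) :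
    pvColA c1 c2 m1 m2 M ms (p :: ps) = pvColA c1 c2 m1 m2 M ms ps := by
  unfold pvColA; rw [List.foldl_cons, if_neg h]

theorem pvColB_cons_hit (c1 c2 : List Char) (m1 m2 : List Bool) (M : Int)
    (ms : List (Nat × Nat)) (p : Nat × Nat) (ps : List (Nat × Nat))
    (h : pvU m1 m2 p = true ∧ pvK c1 c2 p = M) :
    pvColB c1 c2 m1 m2 M ms (p :: ps)
      = pvColB c1 c2 m1 m2 M (if GSTokB ms M p.1 p.2 then ms ++ [p] else ms) ps := by
  unfold pvColB; rw [List.foldl_cons, if_pos h]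

theorem pvColB_cons_miss (c1 c2 : List Char) (m1 m2 : List Bool) (M : Int)
    (ms : List (Nat × Nat)) (p : Nat × Nat) (ps : List (Nat × Nat))
    (h : ¬ (pvU m1 m2 p = true ∧ pvK c1 c2 p = M)) :
    pvColB c1 c2 m1 m2 M ms (p :: ps) = pvColB c1 c2 m1 m2 M ms ps := by
  unfold pvColB; rw [List.foldl_cons, if_neg h]

theorem pvBest_le (c1 c2 : List Char) (m1 m2 : List Bool) :
    ∀ (ps : List (Nat × Nat)) (b : Int), b ≤ pvBest c1 c2 m1 m2 b ps := by
  intro ps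
  induction ps with
  | nil => intro b; simp [pvBest]
  | cons p ps ih =>
    intro b
    by_cases h : pvU m1 m2 p = true ∧ pvK c1 c2 p > b
    · rw [pvBest_cons_hit c1 c2 m1 m2 b p ps h]
      exact le_trans (le_of_lt h.2) (ih _)
    · rw [pvBest_cons_miss c1 c2 m1 m2 b p ps h]
      exact ih b

-- A's evolving (maxmatch, matches) accumulator = B's max-then-collect, on any pair list
theorem pv_scan_main (c1 c2 : List Char) (m1 m2 : List Bool) :
    ∀ (ps : List (Nat × Nat)) (m : Int) (ms : List (Nat × Nat × Int)),
      ps.foldl (pvFA c1 c2 m1 m2) (m, ms) =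
        (pvBest c1 c2 m1 m2 m ps,
         if pvBest c1 c2 m1 m2 m ps = m then pvColA c1 c2 m1 m2 m ms ps
         else pvColA c1 c2 m1 m2 (pvBest c1 c2 m1 m2 m ps) [] ps) := by
  intro ps
  induction ps with
  | nil => intro m ms; simp [pvBest, pvColA]
  | cons p ps ih =>
    intro m ms
    rw [List.foldl_cons]
    by_cases hU : pvU m1 m2 p = true
    · rcases lt_trichotomy (pvK c1 c2 p) m with hk | hk | hk
      · -- smaller than the running maximum: every fold skips p
        have hB := pvBest_le c1 c2 m1 m2 ps m
        rw [pvFA_lt c1 c2 m1 m2 (m, ms) p hU hk,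
            pvBest_cons_miss c1 c2 m1 m2 m p ps (by rintro ⟨-, h2⟩; omega),
            pvColA_cons_miss c1 c2 m1 m2 m ms p ps (by rintro ⟨-, h2⟩; omega),
            pvColA_cons_miss c1 c2 m1 m2 _ [] p ps (by rintro ⟨-, h2⟩; omega)]
        exact ih m ms
      · -- ties the running maximum: append (subject to the adjacency test)
        rw [pvFA_eq c1 c2 m1 m2 (m, ms) p hU hk, hk]
        have hB := pvBest_le c1 c2 m1 m2 ps m
        rw [pvBest_cons_miss c1 c2 m1 m2 m p ps (by rintro ⟨-, h2⟩; omega)]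
        by_cases hBm : pvBest c1 c2 m1 m2 m ps = m
        · rw [if_pos hBm, pvColA_cons_hit c1 c2 m1 m2 m ms p ps ⟨hU, hk⟩, ih, if_pos hBm]
        · rw [if_neg hBm,
              pvColA_cons_miss c1 c2 m1 m2 _ [] p ps (by rintro ⟨-, h2⟩; omega),
              ih, if_neg hBm]
      · -- a new maximum: restart the collection at p
        rw [pvFA_gt c1 c2 m1 m2 (m, ms) p hU hk,
            pvBest_cons_hit c1 c2 m1 m2 m p ps ⟨hU, hk⟩,
            ih (pvK c1 c2 p) [(p.1, p.2, pvK c1 c2 p)]]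
        have hB := pvBest_le c1 c2 m1 m2 ps (pvK c1 c2 p)
        rw [if_neg (show ¬ pvBest c1 c2 m1 m2 (pvK c1 c2 p) ps = m by omega)]
        by_cases hBk : pvBest c1 c2 m1 m2 (pvK c1 c2 p) ps = pvK c1 c2 p
        · rw [if_pos hBk, hBk,
              pvColA_cons_hit c1 c2 m1 m2 (pvK c1 c2 p) [] p ps ⟨hU, rfl⟩]
          rw [show GSTokA ([] : List (Nat × Nat × Int)) p.1 p.2 = true from rfl]
          simp
        · rw [if_neg hBk,
              pvColA_cons_miss c1 c2 m1 m2 (pvBest c1 c2 m1 m2 (pvK c1 c2 p) ps) [] p ps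
                (by rintro ⟨-, h2⟩; omega)]
    · -- marked pair: every fold skips p
      rw [pvFA_skip c1 c2 m1 m2 (m, ms) p hU,
          pvBest_cons_miss c1 c2 m1 m2 m p ps (by tauto),
          pvColA_cons_miss c1 c2 m1 m2 m ms p ps (by tauto),
          pvColA_cons_miss c1 c2 m1 m2 _ [] p ps (by tauto)]
      exact ih m ms

theorem okA_map (ms : List (Nat × Nat)) (M : Int) (i j : Nat) :
    GSTokA (ms.map (fun p => (p.1, p.2, M))) i j = GSTokB ms M i j := by
  unfold GSTokA GSTokB
  rw [List.getLast?_map]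
  cases ms.getLast? <;> rfl

theorem pvColA_map (c1 c2 : List Char) (m1 m2 : List Bool) (M : Int) :
    ∀ (ps : List (Nat × Nat)) (ms : List (Nat × Nat)),
      pvColA c1 c2 m1 m2 M (ms.map (fun p => (p.1, p.2, M))) ps
        = (pvColB c1 c2 m1 m2 M ms ps).map (fun p => (p.1, p.2, M)) := by
  intro ps
  induction ps with
  | nil => intro ms; simp [pvColA, pvColB]
  | cons p ps ih =>
    intro ms
    by_cases hc : pvU m1 m2 p = true ∧ pvK c1 c2 p = M
    · rw [pvColA_cons_hit c1 c2 m1 m2 M _ p ps hc, pvColB_cons_hit c1 c2 m1 m2 M ms p ps hc,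
          okA_map]
      by_cases hok : GSTokB ms M p.1 p.2 = true
      · rw [if_pos hok, if_pos hok]
        have hmap : ms.map (fun p => (p.1, p.2, M)) ++ [(p.1, p.2, M)]
            = (ms ++ [p]).map (fun p => (p.1, p.2, M)) := by simp
        rw [hmap]
        exact ih (ms ++ [p])
      · rw [if_neg hok, if_neg hok]
        exact ih ms
    · rw [pvColA_cons_miss c1 c2 m1 m2 M _ p ps hc, pvColB_cons_miss c1 c2 m1 m2 M ms p ps hc]
      exact ih ms

-- nested-to-flat bridges for the three nested scans
theorem pvFA_apply (c1 c2 : List Char) (m1 m2 : List Bool) (st : Int × List (Nat × Nat × Int))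
    (i j : Nat) :
    pvFA c1 c2 m1 m2 st (i, j) = if m1.getD i true then st else GSTstepA c1 c2 m2 st i j := by
  by_cases h1 : m1.getD i true = true
  · rw [if_pos h1,
        pvFA_skip c1 c2 m1 m2 st (i, j)
          (by rw [pvU_false_left m1 m2 i j h1]; exact Bool.false_ne_true)]
  · have hb1 : m1.getD i true = false := Bool.eq_false_iff.mpr h1
    rw [if_neg h1]
    by_cases h2 : m2.getD j true = true
    · rw [pvFA_skip c1 c2 m1 m2 st (i, j)
          (by rw [pvU_false_right m1 m2 i j h2]; exact Bool.false_ne_true)]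
      unfold GSTstepA
      rw [if_pos h2]
    · have hb2 : m2.getD j true = false := Bool.eq_false_iff.mpr h2
      have hU : pvU m1 m2 (i, j) = true := pvU_true m1 m2 i j hb1 hb2
      unfold GSTstepA pvFA
      rw [if_pos hU, if_neg h2, GSTk_zero]
      simp only [pvK]
      split_ifs <;> rfl

theorem scanA_flat (c1 c2 : List Char) (m1 m2 : List Bool) (MML : Int) :
    GSTscanA c1 c2 m1 m2 MML
      = (pvPairs c1.length c2.length).foldl (pvFA c1 c2 m1 m2) (MML, []) := by
  rw [pvPairs, List.foldl_flatMap]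
  unfold GSTscanA
  congr 1
  funext st i
  rw [List.foldl_map]
  by_cases h1 : m1.getD i true
  · rw [if_pos h1]
    have hfix : (fun (st : Int × List (Nat × Nat × Int)) (j : Nat) => pvFA c1 c2 m1 m2 st (i, j))
        = fun st _ => st := by
      funext st j
      rw [pvFA_apply, if_pos h1]
    rw [hfix, List.foldl_fixed]
  · rw [if_neg h1]
    congr 1
    funext st j
    rw [pvFA_apply, if_neg h1]

theorem best_flat (c1 c2 : List Char) (m1 m2 : List Bool) (MML : Int) :
    GSTbest c1 c2 m1 m2 MML = pvBest c1 c2 m1 m2 MML (pvPairs c1.length c2.length) := by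
  rw [pvPairs]
  unfold pvBest
  rw [List.foldl_flatMap]
  unfold GSTbest
  congr 1
  funext b i
  rw [List.foldl_map]
  by_cases h1 : m1.getD i true = true
  · rw [if_pos h1]
    have hfix : (fun (b : Int) (j : Nat) =>
        if pvU m1 m2 (i, j) = true ∧ pvK c1 c2 (i, j) > b then pvK c1 c2 (i, j) else b)
        = fun b _ => b := by
      funext b j
      rw [if_neg]
      rintro ⟨hu, -⟩
      rw [pvU_false_left m1 m2 i j h1] at hu
      exact Bool.false_ne_true hu
    rw [hfix, List.foldl_fixed]
  · have hb1 : m1.getD i true = false := Bool.eq_false_iff.mpr h1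
    rw [if_neg h1]
    congr 1
    funext b j
    simp only [pvK]
    by_cases h2 : m2.getD j true = true
    · rw [pvU_false_right m1 m2 i j h2, h2]
      simp
    · have hb2 : m2.getD j true = false := Bool.eq_false_iff.mpr h2
      rw [pvU_true m1 m2 i j hb1 hb2, hb2]
      simp

theorem collect_flat (c1 c2 : List Char) (m1 m2 : List Bool) (best : Int) :
    GSTcollect c1 c2 m1 m2 best
      = pvColB c1 c2 m1 m2 best [] (pvPairs c1.length c2.length) := by
  rw [pvPairs]
  unfold pvColB
  rw [List.foldl_flatMap]
  unfold GSTcollect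
  congr 1
  funext ms i
  rw [List.foldl_map]
  by_cases h1 : m1.getD i true = true
  · rw [if_pos h1]
    have hfix : (fun (ms : List (Nat × Nat)) (j : Nat) =>
        if pvU m1 m2 (i, j) = true ∧ pvK c1 c2 (i, j) = best then
          (if GSTokB ms best i j then ms ++ [(i, j)] else ms)
        else ms) = fun ms _ => ms := by
      funext ms j
      rw [if_neg]
      rintro ⟨hu, -⟩
      rw [pvU_false_left m1 m2 i j h1] at hu
      exact Bool.false_ne_true hu
    rw [hfix, List.foldl_fixed]
  · have hb1 : m1.getD i true = false := Bool.eq_false_iff.mpr h1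
    rw [if_neg h1]
    congr 1
    funext ms j
    simp only [pvK]
    by_cases h2 : m2.getD j true = true
    · rw [pvU_false_right m1 m2 i j h2, h2]
      simp
    · have hb2 : m2.getD j true = false := Bool.eq_false_iff.mpr h2
      rw [pvU_true m1 m2 i j hb1 hb2, hb2]
      by_cases hk : (GSTlce c1 c2 i j : Int) = best <;> simp [hk]

-- one round: A's scan = (B's best, B's collected tiles tagged with that length)
theorem scan_eq (c1 c2 : List Char) (m1 m2 : List Bool) (MML : Int) :
    GSTscanA c1 c2 m1 m2 MML =
      (GSTbest c1 c2 m1 m2 MML,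
       (GSTcollect c1 c2 m1 m2 (GSTbest c1 c2 m1 m2 MML)).map
         (fun p => (p.1, p.2, GSTbest c1 c2 m1 m2 MML))) := by
  rw [scanA_flat, pv_scan_main]
  have hcol : (if pvBest c1 c2 m1 m2 MML (pvPairs c1.length c2.length) = MML then
        pvColA c1 c2 m1 m2 MML [] (pvPairs c1.length c2.length)
      else pvColA c1 c2 m1 m2 (pvBest c1 c2 m1 m2 MML (pvPairs c1.length c2.length)) []
        (pvPairs c1.length c2.length))
      = pvColA c1 c2 m1 m2 (pvBest c1 c2 m1 m2 MML (pvPairs c1.length c2.length)) []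
        (pvPairs c1.length c2.length) := by
    split_ifs with h
    · rw [h]
    · rfl
  rw [hcol, ← best_flat]
  have h2 := pvColA_map c1 c2 m1 m2 (GSTbest c1 c2 m1 m2 MML) (pvPairs c1.length c2.length) []
  simp only [List.map_nil] at h2
  rw [h2, ← collect_flat]

theorem loop_eq (c1 c2 : List Char) (MML : Int) :
    ∀ (fuel : Nat) (m1 m2 : List Bool) (sl mm : Int),
      GSTloopA c1 c2 MML fuel m1 m2 sl mm = GSTloopB c1 c2 MML fuel m1 m2 sl mm := by
  intro fuel
  induction fuel with
  | zero => intro m1 m2 sl mm; rfl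
  | succ n ih =>
    intro m1 m2 sl mm
    simp only [GSTloopA, GSTloopB, scan_eq, List.foldl_map, ne_eq, List.map_eq_nil_iff]
    split_ifs with h1 h2 <;> simp_all

-- ===== VERDICT =====
theorem GST_spec : Claim_equal_GST := by
  intro s1 s2 MML _hdom
  show GST s1 s2 MML = GST_alt s1 s2 MML
  unfold GST GST_alt
  exact loop_eq s1.toList s2.toList MML (s1.toList.length + 2) _ _ 0 0
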